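-- pv_equiv track=rewrite | github.com/RunnerHub/chance-sprite | src/chance_sprite/sprite_utils.py | limit_mask
-- ===== SOURCE A (Python) =====
-- def limit_mask(limit, rolls):
--     if limit <= 0 or limit >= len(rolls):
--         return None
--     num_chosen = 0
--     mask = [False for _ in rolls]
--     for value in [6, 5, 4, 3, 2, 1]:
--         for i, el in enumerate(rolls):
--             if el == value:
--                 mask[i] = True
--                 num_chosen += 1
--                 if num_chosen >= limit:
--                     return mask
-- ===== SOURCE B (Python) =====
-- def limit_mask(limit, rolls):
--     if limit <= 0 or limit >= len(rolls):
--         return None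
--     counts = {6: 0, 5: 0, 4: 0, 3: 0, 2: 0, 1: 0}
--     for el in rolls:
--         if el in counts:
--             counts[el] += 1
--     total = 0
--     cutoff = None
--     partial = 0
--     for v in (6, 5, 4, 3, 2, 1):
--         total += counts[v]
--         if total >= limit:
--             cutoff = v
--             partial = counts[v] - (total - limit)
--             break
--     if cutoff is None:
--         return None
--     mask = []
--     for el in rolls:
--         if el in counts and el > cutoff:
--             mask.append(True)
--         elif el == cutoff and partial > 0:
--             mask.append(True)
--             partial -= 1
--         else:
--             mask.append(False)
--     return mask
-- ===== Notes on version B (the rewrite author's own statement) =====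
-- stated objective: faster
-- what changed: A rescans the roll list once per die value (6..1) with an early return mid-scan; B tallies counts in one pass, computes the cutoff value and partial budget arithmetically over the six counts, then builds the mask in a single index-order pass.
import Mathlib
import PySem

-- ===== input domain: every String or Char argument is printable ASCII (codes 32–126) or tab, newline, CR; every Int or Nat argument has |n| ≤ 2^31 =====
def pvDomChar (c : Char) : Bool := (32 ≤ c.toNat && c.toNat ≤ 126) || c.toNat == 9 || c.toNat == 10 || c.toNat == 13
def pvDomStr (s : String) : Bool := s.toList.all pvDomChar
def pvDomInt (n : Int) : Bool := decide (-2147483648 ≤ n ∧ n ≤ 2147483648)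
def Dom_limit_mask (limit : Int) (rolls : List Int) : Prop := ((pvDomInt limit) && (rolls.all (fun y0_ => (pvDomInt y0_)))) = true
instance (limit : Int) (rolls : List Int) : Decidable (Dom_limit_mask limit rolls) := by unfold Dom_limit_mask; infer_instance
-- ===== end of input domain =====

-- ===== PORT A =====
-- B changes the decomposition: one counting pass + arithmetic cutoff + one marking pass, instead of A's per-value rescans.
def innerA (limit v : Int) : List (Int × Int) → List Bool → Int → (List Bool ⊕ (List Bool × Int))
  | [], mask, num => .inr (mask, num)
  | (i, el) :: rest, mask, num =>
    if el = v then
      let mask' := PySem.List.pySetD mask i true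
      let num' := num + 1
      if limit ≤ num' then .inl mask'
      else innerA limit v rest mask' num'
    else innerA limit v rest mask num

def outerA (limit : Int) (rolls : List Int) : List Int → List Bool → Int → Option (List Bool)
  | [], _, _ => none
  | v :: vs, mask, num =>
    match innerA limit v (PySem.List.enumerate rolls) mask num with
    | .inl m => some m
    | .inr (m, n) => outerA limit rolls vs m n

def limit_mask (limit : Int) (rolls : List Int) : Option (List Bool) :=
  if limit ≤ 0 ∨ (rolls.length : Int) ≤ limit then none
  else outerA limit rolls [6, 5, 4, 3, 2, 1] (rolls.map fun _ => false) 0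

-- ===== PORT B =====
def countsB (rolls : List Int) : PySem.Dict Int Int :=
  rolls.foldl (fun d el => if d.contains el then d.modify el 0 (· + 1) else d)
    (PySem.Dict.ofList [(6, 0), (5, 0), (4, 0), (3, 0), (2, 0), (1, 0)])

def cutoffB (limit : Int) (c : PySem.Dict Int Int) : List Int → Int → Option (Int × Int)
  | [], _ => none
  | v :: vs, total =>
    let total' := total + c.getD v 0
    if limit ≤ total' then some (v, c.getD v 0 - (total' - limit))
    else cutoffB limit c vs total'

def markB (c : PySem.Dict Int Int) (cutoff : Int) : List Int → Int → List Bool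
  | [], _ => []
  | el :: rest, p =>
    if c.contains el ∧ cutoff < el then true :: markB c cutoff rest p
    else if el = cutoff ∧ 0 < p then true :: markB c cutoff rest (p - 1)
    else false :: markB c cutoff rest p

def limit_mask_alt (limit : Int) (rolls : List Int) : Option (List Bool) :=
  if limit ≤ 0 ∨ (rolls.length : Int) ≤ limit then none
  else
    let c := countsB rolls
    match cutoffB limit c [6, 5, 4, 3, 2, 1] 0 with
    | none => none
    | some (v, p) => some (markB c v rolls p)

-- ===== PRECONDITION & SPEC =====
def Spec_limit_mask (limit : Int) (rolls : List Int) (out : Option (List Bool)) : Prop := out = limit_mask_alt limit rolls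
instance (limit : Int) (rolls : List Int) (out : Option (List Bool)) : Decidable (Spec_limit_mask limit rolls out) := by unfold Spec_limit_mask; infer_instance

-- ===== CLAIM (what is proved, stated in full; the proofs are below) =====
def Claim_equal_limit_mask : Prop := ∀ (limit : Int) (rolls : List Int), Dom_limit_mask limit rolls → Spec_limit_mask limit rolls (limit_mask limit rolls)

-- ===== LEMMAS AND PROOFS =====

-- mark the first (up to) p occurrences of v true, keep the rest of the mask
def markUp (v : Int) : Int → List Int → List Bool → List Bool
  | p, el :: rs, m :: ms =>
    if el = v ∧ 0 < p then true :: markUp v (p - 1) rs ms else m :: markUp v p rs ms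
  | _, _, ms => ms

-- the descending value list [n, n-1, …, 1]
def valsD : Nat → List Int
  | 0 => []
  | n + 1 => ((n : Int) + 1) :: valsD n

theorem markUp_nonpos (v p : Int) (hp : p ≤ 0) : ∀ (rs : List Int) (ms : List Bool), markUp v p rs ms = ms := by
  intro rs
  induction rs with
  | nil => intro ms; cases ms <;> simp [markUp]
  | cons el rs ih =>
    intro ms
    cases ms with
    | nil => simp [markUp]
    | cons m ms =>
      rw [markUp, if_neg (by rintro ⟨-, h⟩; omega), ih]

theorem innerA_spec (limit v : Int) : ∀ (rest : List Int) (pre suf : List Bool) (num : Int),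
    suf.length = rest.length → num < limit →
    innerA limit v (PySem.List.enumerate rest (pre.length : Int)) (pre ++ suf) num =
      if limit ≤ num + rest.count v
      then .inl (pre ++ markUp v (limit - num) rest suf)
      else .inr (pre ++ List.zipWith (fun el m => if el = v then true else m) rest suf, num + rest.count v) := by
  intro rest
  induction rest with
  | nil =>
    intro pre suf num hl hn
    cases suf with
    | nil =>
      rw [PySem.List.enumerate_nil]
      simp only [innerA, List.count_nil, Nat.cast_zero, add_zero]
      rw [if_neg (by omega)]
      simp
    | cons m ms => simp at hl
  | cons el rs ih =>
    intro pre suf num hl hn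
    cases suf with
    | nil => simp at hl
    | cons m ms =>
      have hl' : ms.length = rs.length := by simpa using hl
      rw [PySem.List.enumerate_cons, innerA]
      by_cases he : el = v
      · subst he
        have hset : PySem.List.pySetD (pre ++ m :: ms) ((pre.length : Nat) : Int) true
            = pre ++ true :: ms := by
          rw [PySem.List.pySetD_natCast, List.set_append, if_neg (by omega)]
          simp
        rw [if_pos rfl, hset]
        have hcnt : (el :: rs).count el = rs.count el + 1 := by simp
        by_cases hle : limit ≤ num + 1
        · have h1 : limit - num = 1 := by omega
          rw [if_pos hle, if_pos (by omega)]
          rw [markUp, if_pos ⟨rfl, by omega⟩, h1]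
          rw [markUp_nonpos el (1 - 1) (by omega)]
        · rw [if_neg hle]
          have hcast : ((pre.length : Nat) : Int) + 1 = (((pre ++ [true]).length : Nat) : Int) := by
            simp
          have hmask : pre ++ true :: ms = (pre ++ [true]) ++ ms := by simp
          rw [hcast, hmask, ih (pre ++ [true]) ms (num + 1) hl' (by omega)]
          by_cases h2 : limit ≤ num + 1 + rs.count el
          · rw [if_pos h2, if_pos (by rw [hcnt]; omega)]
            rw [markUp, if_pos ⟨rfl, by omega⟩]
            have : limit - (num + 1) = limit - num - 1 := by ring
            rw [this]
            simp
          · rw [if_neg h2, if_neg (by rw [hcnt]; omega)]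
            rw [List.zipWith_cons_cons, if_pos rfl, hcnt]
            simp
            omega
      · rw [if_neg he]
        have hcast : ((pre.length : Nat) : Int) + 1 = (((pre ++ [m]).length : Nat) : Int) := by simp
        have hmask : pre ++ m :: ms = (pre ++ [m]) ++ ms := by simp
        rw [hcast, hmask, ih (pre ++ [m]) ms num hl' hn]
        have hcnt : (el :: rs).count v = rs.count v := by simp [he]
        rw [hcnt]
        by_cases h2 : limit ≤ num + rs.count v
        · rw [if_pos h2, if_pos h2]
          rw [markUp, if_neg (by rintro ⟨h, -⟩; exact he h)]
          simp
        · rw [if_neg h2, if_neg h2]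
          rw [List.zipWith_cons_cons, if_neg he]
          simp

theorem zipWith_if_map (v : Int) (f : Int → Bool) (ro : List Int) :
    List.zipWith (fun el m => if el = v then true else m) ro (ro.map f)
      = ro.map (fun el => if el = v then true else f el) := by
  induction ro with
  | nil => simp
  | cons el rs ih => simp only [List.map_cons, List.zipWith_cons_cons, ih]

theorem markB_eq (c : PySem.Dict Int Int) (hc : ∀ x, c.contains x = decide (1 ≤ x ∧ x ≤ 6))
    (v : Int) (h1 : 1 ≤ v) : ∀ (ro : List Int) (p : Int),
    markB c v ro p = markUp v p ro (ro.map fun el => decide (v < el ∧ el ≤ 6)) := by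
  intro ro
  induction ro with
  | nil => intro p; simp [markB, markUp]
  | cons el rs ih =>
    intro p
    rw [List.map_cons, markB]
    by_cases hb1 : (c.contains el = true ∧ v < el)
    · have hm : decide (v < el ∧ el ≤ 6) = true := by
        rw [hc] at hb1
        simp at hb1 ⊢
        omega
      rw [if_pos hb1, markUp, if_neg (by rintro ⟨h, -⟩; omega), hm, ih]
    · rw [if_neg hb1]
      by_cases hb2 : (el = v ∧ 0 < p)
      · rw [if_pos hb2, markUp, if_pos hb2, ih]
      · have hm : decide (v < el ∧ el ≤ 6) = false := by
          simp only [hc] at hb1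
          simp at hb1 ⊢
          intro hlt
          by_contra hle
          exact absurd (hb1 (by omega) (by omega)) (by omega)
        rw [if_neg hb2, markUp, if_neg hb2, hm, ih]

theorem contains_foldl_aux (l : List Int) : ∀ (d : PySem.Dict Int Int) (x : Int),
    ((l.foldl (fun d el => if d.contains el then d.modify el 0 (· + 1) else d) d).contains x) = d.contains x := by
  induction l with
  | nil => intro d x; rfl
  | cons el l ih =>
    intro d x
    rw [List.foldl_cons]
    by_cases h : d.contains el = true
    · rw [if_pos h, ih, PySem.Dict.contains_modify]
      by_cases hx : x = el
      · subst hx; simp [h]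
      · simp [hx]
    · rw [if_neg h, ih]

theorem contains_countsB (rolls : List Int) (x : Int) :
    (countsB rolls).contains x = decide (1 ≤ x ∧ x ≤ 6) := by
  rw [countsB, contains_foldl_aux]
  simp [PySem.Dict.ofList, PySem.Dict.update, PySem.Dict.contains_mk, PySem.Dict.insert, PySem.Dict.empty]
  rw [Bool.eq_iff_iff]
  simp
  omega

theorem getD_foldl_aux (v : Int) (l : List Int) : ∀ (d : PySem.Dict Int Int), d.contains v = true →
    ((l.foldl (fun d el => if d.contains el then d.modify el 0 (· + 1) else d) d).getD v 0)
      = d.getD v 0 + l.count v := by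
  induction l with
  | nil => intro d _; simp
  | cons el l ih =>
    intro d hv
    rw [List.foldl_cons, List.count_cons]
    by_cases h : d.contains el = true
    · rw [if_pos h, ih _ (by rw [PySem.Dict.contains_modify]; simp [hv]), PySem.Dict.getD_modify]
      by_cases hx : v = el
      · subst hx; simp; omega
      · rw [if_neg hx, if_neg (by simp [Ne.symm hx])]
        omega
    · have hne : (el == v) = false := by
        by_contra hcon
        simp at hcon
        subst hcon
        exact h hv
      rw [if_neg h, hne, ih _ hv]
      simp

theorem getD_countsB (rolls : List Int) (v : Int) (h1 : 1 ≤ v) (h6 : v ≤ 6) :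
    (countsB rolls).getD v 0 = rolls.count v := by
  rw [countsB, getD_foldl_aux v rolls _ (by
    simp [PySem.Dict.ofList, PySem.Dict.update, PySem.Dict.contains_mk, PySem.Dict.insert, PySem.Dict.empty]
    omega)]
  have h0 : (PySem.Dict.ofList [((6:Int),(0:Int)),(5,0),(4,0),(3,0),(2,0),(1,0)]).getD v 0 = 0 := by
    simp [PySem.Dict.ofList, PySem.Dict.update, PySem.Dict.insert, PySem.Dict.empty,
      PySem.Dict.getD_eq_get?_getD, PySem.Dict.get?_mk_cons]
    split_ifs <;> simp [PySem.Dict.get?]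
  rw [h0]
  omega

theorem chain (limit : Int) (rolls : List Int) :
    ∀ (n : Nat) (num : Int), n ≤ 6 → num < limit →
    outerA limit rolls (valsD n) (rolls.map (fun el => decide ((n : Int) < el ∧ el ≤ 6))) num
      = match cutoffB limit (countsB rolls) (valsD n) num with
        | none => none
        | some (v, p) => some (markB (countsB rolls) v rolls p) := by
  intro n
  induction n with
  | zero => intro num _ _; rfl
  | succ n ih =>
    intro num h6 hnum
    have h6' : ((n : Int) + 1) ≤ 6 := by
      have : (n : Int) + 1 ≤ 7 - 1 + 1 := by
        have := h6
        omega
      omega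
    rw [valsD, outerA, cutoffB]
    have hgd : (countsB rolls).getD ((n : Int) + 1) 0 = rolls.count ((n : Int) + 1) :=
      getD_countsB rolls _ (by omega) h6'
    have hspec := innerA_spec limit ((n : Int) + 1) rolls []
      (rolls.map (fun el => decide (((n : Nat) + 1 : Int) < el ∧ el ≤ 6))) num (by simp) hnum
    simp only [List.length_nil, Nat.cast_zero, List.nil_append] at hspec
    have hmcast : (rolls.map (fun el => decide ((((n : Nat) + 1 : Nat) : Int) < el ∧ el ≤ 6)))
        = rolls.map (fun el => decide (((n : Nat) + 1 : Int) < el ∧ el ≤ 6)) := by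
      push_cast
      rfl
    rw [hmcast, hspec, hgd]
    by_cases hc : limit ≤ num + rolls.count ((n : Int) + 1)
    · rw [if_pos hc, if_pos hc]
      simp only []
      rw [markB_eq (countsB rolls) (contains_countsB rolls) ((n : Int) + 1) (by omega)]
      have harith : rolls.count ((n : Int) + 1) - (num + rolls.count ((n : Int) + 1) - limit)
          = limit - num := by ring
      rw [harith]
    · rw [if_neg hc, if_neg hc]
      simp only []
      rw [zipWith_if_map]
      have hmap : rolls.map (fun el => if el = (n : Int) + 1 then true
            else decide (((n : Int) + 1) < el ∧ el ≤ 6))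
          = rolls.map (fun el => decide ((n : Int) < el ∧ el ≤ 6)) := by
        apply List.map_congr_left
        intro el _
        by_cases h : el = (n : Int) + 1
        · subst h
          rw [if_pos rfl, eq_comm, decide_eq_true_eq]
          exact ⟨by omega, h6'⟩
        · rw [if_neg h, decide_eq_decide]
          omega
      rw [hmap, ih (num + rolls.count ((n : Int) + 1)) (by omega) (by omega)]

-- ===== VERDICT (by name: the statement is the Claim_ definition above) =====
theorem limit_mask_spec : Claim_equal_limit_mask := by
  intro limit rolls _
  unfold Spec_limit_mask limit_mask limit_mask_alt
  by_cases hg : limit ≤ 0 ∨ (rolls.length : Int) ≤ limit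
  · rw [if_pos hg, if_pos hg]
  · rw [if_neg hg, if_neg hg]
    have hvals : [(6:Int), 5, 4, 3, 2, 1] = valsD 6 := by norm_num [valsD]
    have hmask : rolls.map (fun _ => false)
        = rolls.map (fun el => decide (((6:Nat) : Int) < el ∧ el ≤ 6)) := by
      apply List.map_congr_left
      intro el _
      have : decide (((6:Nat) : Int) < el ∧ el ≤ 6) = false := by
        rw [decide_eq_false_iff_not]
        rintro ⟨ha, hb⟩
        omega
      rw [this]
    rw [hvals, hmask, chain limit rolls 6 0 (by omega) (by omega)]
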